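-- pv_equiv track=rewrite | github.com/APARGA9403/first-great-rep | a3.py | board_contains_word_in_column
-- ===== SOURCE A (Python) =====
-- def make_str_from_column(board, column_index):
--     """ (list of list of str, int) -> str
--
--     Return all of the characters from the column of the board with index column_index
--     as a single string.
--
--     >>> make_str_from_column([['A', 'N', 'T', 'T'], ['X', 'S', 'O', 'B']], 1)
--     'NS'
--     """
--
--     string = ''
--
--     for sub_list in board:
--         for sub_char in range(len(sub_list)):
--             if sub_char == column_index:
--                 string = string + sub_list[sub_char]
--     return string
--
-- def board_contains_word_in_column(board, word):
--     """ (list of list of str, str) -> bool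
--
--     Return True if and only if one or more of the columns of the board
--     contains word.
--
--     Precondition: board has at least one row and one column, and word is a
--     valid word.
--
--     >>> board_contains_word_in_column([['A', 'N', 'T', 'T'], ['X', 'S', 'O', 'B']], 'NO')
--     False
--     """
--     list3 = []
--     for index in range(len(board)-(len(board)-1)):
--         for item in range(len(board[index])):
--             string = make_str_from_column(board, index)
--             list3.append(string)
--             index = index+1
--
--     for item in list3:
--         if word in item:
--             return True
--     return False
-- ===== SOURCE B (Python) =====
-- def board_contains_word_in_column(board, word):
--     ncols = len(board[0])
--     columns = [''] * ncols
--     for row in board: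
--         for c, cell in enumerate(row[:ncols]):
--             columns[c] = columns[c] + cell
--     return any(word in col for col in columns)
-- ===== Notes on version B (the rewrite author's own statement) =====
-- stated objective: faster
-- what changed: B transposes the board in one row-major pass (appending each cell to its column string, only for the first len(board[0]) columns), instead of A's rebuilding each column by a full nested scan of the whole board per column; then checks each column once.
import Mathlib
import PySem

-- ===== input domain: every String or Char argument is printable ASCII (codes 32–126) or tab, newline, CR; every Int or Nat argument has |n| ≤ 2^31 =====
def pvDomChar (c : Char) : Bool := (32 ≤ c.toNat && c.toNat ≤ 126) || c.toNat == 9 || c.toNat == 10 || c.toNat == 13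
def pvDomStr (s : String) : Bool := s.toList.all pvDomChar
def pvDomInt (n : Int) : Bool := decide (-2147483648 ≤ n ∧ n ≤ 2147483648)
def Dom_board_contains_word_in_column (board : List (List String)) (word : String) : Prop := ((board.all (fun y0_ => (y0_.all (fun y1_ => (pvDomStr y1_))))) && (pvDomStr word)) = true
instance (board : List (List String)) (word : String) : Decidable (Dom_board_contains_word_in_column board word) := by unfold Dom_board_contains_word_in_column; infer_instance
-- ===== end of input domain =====

-- B builds all column strings in ONE row-major transposing pass instead of A's
-- per-column full nested scans of the whole board (faster by that mechanism).

-- ===== PORT A =====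
-- helper: make_str_from_column — scans every cell index of every row, keeping those equal to column_index
def make_str_from_column (board : List (List String)) (column_index : Nat) : String :=
  board.foldl (fun string sub_list =>
    (List.range sub_list.length).foldl
      (fun s2 sub_char => if sub_char = column_index then s2 ++ sub_list.getD sub_char "" else s2)
      string) ""

-- A: 'range(len(board)-(len(board)-1))' is always range(1), so index starts at 0;
-- 'board[0]' raises IndexError on an empty board (excluded by Pre_); the inner loop
-- runs len(board[0]) times, incrementing index each time.
def board_contains_word_in_column (board : List (List String)) (word : String) : Bool :=
  match board with
  | [] => false   -- A raises IndexError here; outside Pre_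
  | row0 :: _ =>
    let list3 :=
      ((List.range row0.length).foldl
        (fun (st : List String × Nat) _ => (st.1 ++ [make_str_from_column board st.2], st.2 + 1))
        ([], 0)).1
    list3.any (fun item => PySem.Str.isIn word item)

-- ===== PORT B =====
-- one row of B's pass: for c, cell in enumerate(row[:ncols]): columns[c] = columns[c] + cell
def pvStepRow (ncols : Nat) (cols : List String) (row : List String) : List String :=
  ((row.take ncols).zipIdx).foldl
    (fun cs p => cs.set p.2 (cs.getD p.2 "" ++ p.1)) cols

def board_contains_word_in_column_alt (board : List (List String)) (word : String) : Bool :=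
  match board with
  | [] => false   -- Source B raises IndexError here; outside Pre_
  | row0 :: _ =>
    let ncols := row0.length
    let columns := board.foldl (fun cols row => pvStepRow ncols cols row) (List.replicate ncols "")
    columns.any (fun col => PySem.Str.isIn word col)

-- ===== PRECONDITION & SPEC =====
-- Both A and B index board[0], which raises IndexError on an empty board.
def Pre_board_contains_word_in_column (board : List (List String)) (word : String) : Prop := board ≠ []
instance (board : List (List String)) (word : String) : Decidable (Pre_board_contains_word_in_column board word) := by unfold Pre_board_contains_word_in_column; infer_instance
def pvWitness_board_contains_word_in_column : List (List String) × String := ([["A", "N"], ["X", "S"]], "NS")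

def Spec_board_contains_word_in_column (board : List (List String)) (word : String) (out : Bool) : Prop := out = board_contains_word_in_column_alt board word
instance (board : List (List String)) (word : String) (out : Bool) : Decidable (Spec_board_contains_word_in_column board word out) := by unfold Spec_board_contains_word_in_column; infer_instance

-- ===== CLAIM (what is proved, stated in full; the proofs are below) =====
def Claim_equal_board_contains_word_in_column : Prop := ∀ (board : List (List String)) (word : String), Dom_board_contains_word_in_column board word → Pre_board_contains_word_in_column board word → Spec_board_contains_word_in_column board word (board_contains_word_in_column board word)

-- ===== LEMMAS AND PROOFS =====

-- the reference column string: concatenate row[c] over all rows (getD gives "" past a short row)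
def pvColStr (board : List (List String)) (c : Nat) : String :=
  board.foldl (fun s row => s ++ row.getD c "") ""

lemma pvColStr_acc (board : List (List String)) (c : Nat) :
    ∀ s : String, board.foldl (fun s row => s ++ row.getD c "") s = s ++ pvColStr board c := by
  induction board with
  | nil => intro s; simp [pvColStr]
  | cons row rows ih =>
    intro s
    simp only [pvColStr, List.foldl_cons]
    rw [ih, ih ("" ++ row.getD c "")]
    simp [String.append_assoc]

lemma pvColStr_cons (row : List String) (rows : List (List String)) (c : Nat) :
    pvColStr (row :: rows) c = row.getD c "" ++ pvColStr rows c := by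
  simp only [pvColStr, List.foldl_cons]
  rw [pvColStr_acc]
  simp [pvColStr, List.getD_eq_getElem?_getD]

-- A's inner scan of one row picks out exactly cell column_index
lemma pvInner_range (row : List String) (ci : Nat) :
    ∀ n : Nat, ∀ s : String,
      (List.range n).foldl (fun s2 sub_char => if sub_char = ci then s2 ++ row.getD sub_char "" else s2) s
        = s ++ (if ci < n then row.getD ci "" else "") := by
  intro n
  induction n with
  | zero => intro s; simp
  | succ m ih =>
    intro s
    rw [List.range_succ, List.foldl_append, ih]
    by_cases h : m = ci
    · subst h; simp
    · by_cases h2 : ci < m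
      · simp [h, h2, Nat.lt_succ_of_lt h2]
      · have : ¬ ci < m + 1 := by omega
        simp [h, h2, this]

lemma make_str_eq_colStr (board : List (List String)) (ci : Nat) :
    make_str_from_column board ci = pvColStr board ci := by
  unfold make_str_from_column pvColStr
  apply PySem.List.foldl_congr_mem
  intro s row _
  rw [pvInner_range row ci row.length s]
  by_cases h : ci < row.length
  · simp [h]
  · have hd : row.getD ci "" = "" := by
      rw [List.getD_eq_getElem?_getD, List.getElem?_eq_none (by omega : row.length ≤ ci)]
      rfl
    rw [if_neg h, hd]

-- A's outer loop builds the columns 0..n-1 in order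
lemma pvA_list3 (board : List (List String)) :
    ∀ (n k : Nat) (l : List String),
      (List.range n).foldl
        (fun (st : List String × Nat) _ => (st.1 ++ [make_str_from_column board st.2], st.2 + 1))
        (l, k)
      = (l ++ (List.range n).map (fun i => make_str_from_column board (k + i)), k + n) := by
  intro n
  induction n with
  | zero => intro k l; simp
  | succ m ih =>
    intro k l
    rw [List.range_succ, List.foldl_append, ih]
    simp [List.map_append, List.append_assoc]
    omega

-- one set-step fold of B, elementwise
lemma pvSetFold_getElem? (xs : List String) :
    ∀ (k : Nat) (cs : List String) (j : Nat), k + xs.length ≤ cs.length → j < cs.length →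
      ((xs.zipIdx k).foldl (fun cs p => cs.set p.2 (cs.getD p.2 "" ++ p.1)) cs)[j]?
        = some (cs.getD j "" ++ (if k ≤ j ∧ j < k + xs.length then xs.getD (j - k) "" else "")) := by
  induction xs with
  | nil =>
    intro k cs j _ hj
    simp [List.getElem?_eq_getElem hj, List.getD_eq_getElem?_getD, List.getElem?_eq_getElem hj,
      (by omega : ¬ (k ≤ j ∧ j < k + 0))]
  | cons x xs ih =>
    intro k cs j hlen hj
    rw [List.zipIdx_cons, List.foldl_cons]
    have hk : k < cs.length := by simp at hlen; omega
    have hlen' : (k + 1) + xs.length ≤ (cs.set k (cs.getD k "" ++ x)).length := by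
      simp at hlen ⊢; omega
    have hj' : j < (cs.set k (cs.getD k "" ++ x)).length := by simpa using hj
    rw [ih (k + 1) _ j hlen' hj']
    have hgetD : (cs.set k (cs.getD k "" ++ x)).getD j ""
        = if k = j then cs.getD k "" ++ x else cs.getD j "" := by
      simp [List.getD_eq_getElem?_getD, List.getElem?_set, hk]
      split_ifs with h
      · subst h; rfl
      · rfl
    by_cases h : k = j
    · subst h
      simp [hgetD, (by omega : ¬ (k + 1 ≤ k)), (by omega : k ≤ k ∧ k < k + (xs.length + 1))]
      simp [List.getD_eq_getElem?_getD, List.getElem?_set, hk]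
    · rw [hgetD, if_neg h]
      by_cases h2 : k + 1 ≤ j ∧ j < k + 1 + xs.length
      · have h3 : k ≤ j ∧ j < k + (x :: xs).length := by simp; omega
        rw [if_pos h2, if_pos h3]
        have : j - k = (j - (k + 1)) + 1 := by omega
        simp [this]
      · have h3 : ¬ (k ≤ j ∧ j < k + (x :: xs).length) := by simp at h2 ⊢; omega
        rw [if_neg h2, if_neg h3]

lemma pvSetFold_length (xs : List String) :
    ∀ (k : Nat) (cs : List String),
      ((xs.zipIdx k).foldl (fun cs p => cs.set p.2 (cs.getD p.2 "" ++ p.1)) cs).length = cs.length := by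
  induction xs with
  | nil => intro k cs; rfl
  | cons x xs ih => intro k cs; rw [List.zipIdx_cons, List.foldl_cons, ih]; simp

lemma pvStepRow_length (ncols : Nat) (cols row : List String) :
    (pvStepRow ncols cols row).length = cols.length := pvSetFold_length _ 0 cols

lemma pvStepRow_getElem? (ncols : Nat) (cols row : List String) (j : Nat)
    (hc : cols.length = ncols) (hj : j < ncols) :
    (pvStepRow ncols cols row)[j]? = some (cols.getD j "" ++ row.getD j "") := by
  unfold pvStepRow
  have hlen : 0 + (row.take ncols).length ≤ cols.length := by
    simp only [Nat.zero_add, List.length_take]; omega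
  rw [pvSetFold_getElem? (row.take ncols) 0 cols j hlen (by omega)]
  congr 2
  by_cases h : j < (row.take ncols).length
  · have hr : j < row.length := by simp at h; omega
    rw [if_pos (by omega : 0 ≤ j ∧ j < 0 + (row.take ncols).length)]
    simp [List.getD_eq_getElem?_getD, List.getElem?_take, hj, hr]
  · rw [if_neg (by omega)]
    have hr : row.length ≤ j := by simp at h; omega
    rw [List.getD_eq_getElem?_getD, List.getElem?_eq_none hr]
    rfl

-- B's main fold: after processing all rows, column j holds cs.getD j "" ++ pvColStr rows j
lemma pvB_fold (rows : List (List String)) (ncols : Nat) :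
    ∀ (cs : List String), cs.length = ncols →
      ∀ j < ncols,
        (rows.foldl (fun cols row => pvStepRow ncols cols row) cs)[j]?
          = some (cs.getD j "" ++ pvColStr rows j) := by
  induction rows with
  | nil =>
    intro cs hc j hj
    have hj' : j < cs.length := by omega
    simp [pvColStr, List.getElem?_eq_getElem hj', List.getD_eq_getElem?_getD,
      List.getElem?_eq_getElem hj']
  | cons row rows ih =>
    intro cs hc j hj
    rw [List.foldl_cons]
    rw [ih (pvStepRow ncols cs row) (by rw [pvStepRow_length]; exact hc) j hj]
    have h1 : (pvStepRow ncols cs row)[j]? = some (cs.getD j "" ++ row.getD j "") :=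
      pvStepRow_getElem? ncols cs row j hc hj
    have h2 : (pvStepRow ncols cs row).getD j "" = cs.getD j "" ++ row.getD j "" := by
      rw [List.getD_eq_getElem?_getD, h1]; rfl
    rw [h2, pvColStr_cons, String.append_assoc]

-- B's columns list equals the list of reference column strings
lemma pvFold_length (rows : List (List String)) (ncols : Nat) :
    ∀ (cs : List String),
      (rows.foldl (fun cols row => pvStepRow ncols cols row) cs).length = cs.length := by
  induction rows with
  | nil => intro cs; rfl
  | cons r rs ih =>
    intro cs
    rw [List.foldl_cons, ih, pvStepRow_length]

lemma pvB_columns (board : List (List String)) (ncols : Nat) :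
    board.foldl (fun cols row => pvStepRow ncols cols row) (List.replicate ncols "")
      = (List.range ncols).map (fun c => pvColStr board c) := by
  apply List.ext_getElem?
  intro j
  have hlen : (board.foldl (fun cols row => pvStepRow ncols cols row) (List.replicate ncols "")).length = ncols := by
    rw [pvFold_length]; simp
  by_cases hj : j < ncols
  · rw [pvB_fold board ncols (List.replicate ncols "") (by simp) j hj]
    have : (List.replicate ncols "").getD j "" = ("" : String) := by
      rw [List.getD_eq_getElem?_getD]; simp [hj]
    rw [this]
    simp [hj, String.empty_append]
  · rw [List.getElem?_eq_none (by omega : (board.foldl (fun cols row => pvStepRow ncols cols row) (List.replicate ncols "")).length ≤ j),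
        List.getElem?_eq_none (by simp; omega : ((List.range ncols).map (fun c => pvColStr board c)).length ≤ j)]

-- ===== VERDICT (by name: the statement is the Claim_ definition above) =====
theorem board_contains_word_in_column_spec : Claim_equal_board_contains_word_in_column := by
  intro board word _ hpre
  unfold Spec_board_contains_word_in_column
  match board with
  | [] => exact absurd rfl hpre
  | row0 :: rest =>
    unfold board_contains_word_in_column board_contains_word_in_column_alt
    simp only
    rw [pvA_list3 (row0 :: rest) row0.length 0 []]
    rw [pvB_columns (row0 :: rest) row0.length]
    simp only [List.nil_append]
    congr 1
    apply List.map_congr_left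
    intro i _
    rw [Nat.zero_add, make_str_eq_colStr]
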